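-- pv_equiv track=rewrite | github.com/danielholmes839/dsc-workshops | ITI1120-final-review/solutions/q1.py | mekong
-- ===== SOURCE A (Python) =====
-- def mekong(l, div):
--     """(list of int, list of int)-> list of tuples"""
--     final = []
--     for i in range(0, len(l)):
--         for j in range(i+1, len(l)):
--             for k in range(0, len(div)):
--                 if l[i] % div[k] == 0 and l[j] % div[k] == 0:
--                     t = l[i], l[j]
--                     if t not in final:
--                         final.append(t)
--     return final
-- ===== SOURCE B (Python) =====
-- def mekong(l, div):
--     """(list of int, list of int)-> list of tuples"""
--     if len(l) < 2:
--         return []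
--     divs_of = [frozenset(d for d in div if x % d == 0) for x in l]
--     final = []
--     seen = set()
--     for i in range(len(l)):
--         for j in range(i + 1, len(l)):
--             t = (l[i], l[j])
--             if t not in seen and not divs_of[i].isdisjoint(divs_of[j]):
--                 seen.add(t)
--                 final.append(t)
--     return final
-- ===== Notes on version B (the rewrite author's own statement) =====
-- stated objective: faster
-- what changed: B precomputes, per element, the set of divisors in div that divide it, then scans pairs once testing disjointness of the precomputed sets and deduplicating with a seen-set, instead of A's per-pair rescan of div combined with a linear 't not in final' membership scan.
import Mathlib
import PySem

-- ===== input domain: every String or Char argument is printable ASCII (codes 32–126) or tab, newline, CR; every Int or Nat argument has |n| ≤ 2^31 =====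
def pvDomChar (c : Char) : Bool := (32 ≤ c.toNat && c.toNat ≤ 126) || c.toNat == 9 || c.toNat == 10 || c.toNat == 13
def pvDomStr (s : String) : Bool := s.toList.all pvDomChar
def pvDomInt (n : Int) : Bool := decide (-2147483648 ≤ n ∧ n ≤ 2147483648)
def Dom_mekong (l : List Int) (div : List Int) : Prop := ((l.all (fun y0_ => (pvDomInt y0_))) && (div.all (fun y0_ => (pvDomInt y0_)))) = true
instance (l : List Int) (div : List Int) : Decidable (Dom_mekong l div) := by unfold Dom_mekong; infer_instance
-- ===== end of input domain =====

-- B replaces A's per-pair rescan of div and the linear `t not in final` check by a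
-- precomputed divisor set per element plus a seen-set (objective: faster, constant-factor).
-- ===== PORT A =====
def mekong (l : List Int) (div : List Int) : List (Int × Int) :=
  (PySem.List.pyRange 0 (PySem.List.len l)).foldl (fun final i =>
    (PySem.List.pyRange (i + 1) (PySem.List.len l)).foldl (fun final j =>
      (PySem.List.pyRange 0 (PySem.List.len div)).foldl (fun final k =>
        if PySem.Int.mod (PySem.List.pyGetD l i 0) (PySem.List.pyGetD div k 0) = 0 ∧
           PySem.Int.mod (PySem.List.pyGetD l j 0) (PySem.List.pyGetD div k 0) = 0 then
          if (PySem.List.pyGetD l i 0, PySem.List.pyGetD l j 0) ∈ final then final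
          else final ++ [(PySem.List.pyGetD l i 0, PySem.List.pyGetD l j 0)]
        else final) final) final) []

-- ===== PORT B =====
def mekong_alt (l : List Int) (div : List Int) : List (Int × Int) :=
  if PySem.List.len l < 2 then []
  else
    let divsOf := l.map (fun x => PySem.Set.ofList (div.filter (fun d => decide (PySem.Int.mod x d = 0))))
    ((PySem.List.pyRange 0 (PySem.List.len l)).foldl
      (fun (st : List (Int × Int) × PySem.Set (Int × Int)) i =>
        (PySem.List.pyRange (i + 1) (PySem.List.len l)).foldl (fun st j =>
          let t := (PySem.List.pyGetD l i 0, PySem.List.pyGetD l j 0)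
          if PySem.Set.contains st.2 t = false ∧
             PySem.Set.isdisjoint (PySem.List.pyGetD divsOf i PySem.Set.empty)
                                  (PySem.List.pyGetD divsOf j PySem.Set.empty) = false then
            (st.1 ++ [t], PySem.Set.add st.2 t)
          else st) st)
      ([], PySem.Set.empty)).1

-- ===== PRECONDITION & SPEC =====
-- Pre_ excludes exactly the inputs where Python A raises ZeroDivisionError:
-- a zero divisor together with at least two elements (the pair loops then run l[i] % 0).
def Pre_mekong (l : List Int) (div : List Int) : Prop := (0 : Int) ∈ div → l.length < 2
instance (l : List Int) (div : List Int) : Decidable (Pre_mekong l div) := by unfold Pre_mekong; infer_instance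
def pvWitness_mekong : List Int × List Int := ([6, 4, 9], [2, 3])

def Spec_mekong (l : List Int) (div : List Int) (out : List (Int × Int)) : Prop := out = mekong_alt l div
instance (l : List Int) (div : List Int) (out : List (Int × Int)) : Decidable (Spec_mekong l div out) := by unfold Spec_mekong; infer_instance

-- ===== CLAIM (what is proved, stated in full; the proofs are below) =====
def Claim_equal_mekong : Prop := ∀ (l : List Int) (div : List Int), Dom_mekong l div → Pre_mekong l div → Spec_mekong l div (mekong l div)

-- ===== LEMMAS AND PROOFS =====

-- whether some divisor in `div` divides both li and lj
def pvShares (div : List Int) (li lj : Int) : Bool :=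
  div.any (fun d => decide (PySem.Int.mod li d = 0) && decide (PySem.Int.mod lj d = 0))

-- proof-side names for the loop bodies of the two ports (definitionally equal to them)
def pvStepA (l d : List Int) (i : Int) (final : List (Int × Int)) (j : Int) : List (Int × Int) :=
  (PySem.List.pyRange 0 (PySem.List.len d)).foldl (fun final k =>
    if PySem.Int.mod (PySem.List.pyGetD l i 0) (PySem.List.pyGetD d k 0) = 0 ∧
       PySem.Int.mod (PySem.List.pyGetD l j 0) (PySem.List.pyGetD d k 0) = 0 then
      if (PySem.List.pyGetD l i 0, PySem.List.pyGetD l j 0) ∈ final then final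
      else final ++ [(PySem.List.pyGetD l i 0, PySem.List.pyGetD l j 0)]
    else final) final

def pvStepB (l d : List Int) (i : Int)
    (st : List (Int × Int) × PySem.Set (Int × Int)) (j : Int) :
    List (Int × Int) × PySem.Set (Int × Int) :=
  if PySem.Set.contains st.2 (PySem.List.pyGetD l i 0, PySem.List.pyGetD l j 0) = false ∧
     PySem.Set.isdisjoint
       (PySem.List.pyGetD (l.map (fun x => PySem.Set.ofList (d.filter (fun d => decide (PySem.Int.mod x d = 0))))) i PySem.Set.empty)
       (PySem.List.pyGetD (l.map (fun x => PySem.Set.ofList (d.filter (fun d => decide (PySem.Int.mod x d = 0))))) j PySem.Set.empty) = false then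
    (st.1 ++ [(PySem.List.pyGetD l i 0, PySem.List.pyGetD l j 0)],
      PySem.Set.add st.2 (PySem.List.pyGetD l i 0, PySem.List.pyGetD l j 0))
  else st

-- A's innermost k-loop, folded over the divisor values
lemma pv_innerA (d : List Int) (li lj : Int) (final : List (Int × Int)) :
    (PySem.List.pyRange 0 (PySem.List.len d)).foldl (fun final k =>
        if PySem.Int.mod li (PySem.List.pyGetD d k 0) = 0 ∧
           PySem.Int.mod lj (PySem.List.pyGetD d k 0) = 0 then
          if (li, lj) ∈ final then final else final ++ [(li, lj)]
        else final) final
      = if pvShares d li lj = true ∧ (li, lj) ∉ final then final ++ [(li, lj)] else final := by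
  rw [PySem.List.foldl_pyRange_zero_pyGetD d 0
      (fun final x => if PySem.Int.mod li x = 0 ∧ PySem.Int.mod lj x = 0 then
          (if (li, lj) ∈ final then final else final ++ [(li, lj)]) else final) final]
  induction d generalizing final with
  | nil => simp [pvShares]
  | cons x ds ih =>
    simp only [List.foldl_cons]
    by_cases hd : PySem.Int.mod li x = 0 ∧ PySem.Int.mod lj x = 0
    · by_cases hm : (li, lj) ∈ final
      · simp [hd, hm, ih, pvShares]
      · simp [hd, hm, ih, pvShares]
    · simp only [if_neg hd, ih]
      have : pvShares (x :: ds) li lj = pvShares ds li lj := by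
        simp [pvShares, List.any_cons]
        intro h1 h2
        exact absurd ⟨h1, h2⟩ hd
      rw [this]

-- B's disjointness test on the precomputed divisor sets equals pvShares
lemma pv_disjoint (d : List Int) (li lj : Int) :
    (PySem.Set.isdisjoint
        (PySem.Set.ofList (d.filter (fun x => decide (PySem.Int.mod li x = 0))))
        (PySem.Set.ofList (d.filter (fun x => decide (PySem.Int.mod lj x = 0)))) = false)
      ↔ pvShares d li lj = true := by
  simp only [pvShares, PySem.Set.isdisjoint, PySem.Set.contains,
    Bool.not_eq_false', List.any_eq_true, Bool.and_eq_true, List.elem_iff,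
    decide_eq_true_eq, PySem.Set.mem_ofList, List.mem_filter]
  constructor
  · rintro ⟨x, ⟨hx, h1⟩, _, h2⟩
    exact ⟨x, hx, by simpa using h1, by simpa using h2⟩
  · rintro ⟨x, hx, h1, h2⟩
    exact ⟨x, ⟨hx, by simpa using h1⟩, ⟨hx, by simpa using h2⟩⟩

-- pyGetD over a mapped list at a valid index
lemma pv_getD_map {β : Type} (f : Int → β) (d : β) (l : List Int) (i : Int)
    (h0 : 0 ≤ i) (h1 : i < (l.length : Int)) :
    PySem.List.pyGetD (l.map f) i d = f (PySem.List.pyGetD l i 0) := by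
  rw [PySem.List.pyGetD_eq_getElem (l.map f) d h0 (by simpa using h1),
      PySem.List.pyGetD_eq_getElem l 0 h0 h1]
  simp

-- one step of the pair loop: A's and B's bodies agree and the seen-set invariant is preserved
lemma pv_step (l d : List Int) (i j : Int)
    (hi0 : 0 ≤ i) (hi1 : i < (l.length : Int)) (hj0 : 0 ≤ j) (hj1 : j < (l.length : Int))
    (final : List (Int × Int)) (seen : PySem.Set (Int × Int))
    (hinv : ∀ x, x ∈ seen ↔ x ∈ final) :
    pvStepA l d i final j = (pvStepB l d i (final, seen) j).1 ∧
    (∀ x, x ∈ (pvStepB l d i (final, seen) j).2 ↔ x ∈ (pvStepB l d i (final, seen) j).1) := by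
  unfold pvStepA pvStepB
  rw [pv_innerA]
  rw [pv_getD_map _ _ _ _ hi0 hi1, pv_getD_map _ _ _ _ hj0 hj1]
  have hcontains :
      (PySem.Set.contains ((final, seen) : List (Int × Int) × PySem.Set (Int × Int)).2
          (PySem.List.pyGetD l i 0, PySem.List.pyGetD l j 0) = false)
        ↔ (PySem.List.pyGetD l i 0, PySem.List.pyGetD l j 0) ∉ final := by
    simp [PySem.Set.contains, hinv]
  by_cases hc : pvShares d (PySem.List.pyGetD l i 0) (PySem.List.pyGetD l j 0) = true ∧
      ((PySem.List.pyGetD l i 0, PySem.List.pyGetD l j 0) : Int × Int) ∉ final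
  · rw [if_pos hc, if_pos ⟨hcontains.mpr hc.2, (pv_disjoint d _ _).mpr hc.1⟩]
    refine ⟨rfl, fun x => ?_⟩
    rw [PySem.Set.mem_add]
    simp [hinv x]
  · rw [if_neg hc, if_neg (by
      rintro ⟨ha, hb⟩
      exact hc ⟨(pv_disjoint d _ _).mp hb, hcontains.mp ha⟩)]
    exact ⟨rfl, hinv⟩

-- the inner j-loop
lemma pv_loopJ (l d : List Int) (i : Int) (hi0 : 0 ≤ i) (hi1 : i < (l.length : Int))
    (js : List Int) (hjs : ∀ j ∈ js, 0 ≤ j ∧ j < (l.length : Int))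
    (final : List (Int × Int)) (seen : PySem.Set (Int × Int))
    (hinv : ∀ x, x ∈ seen ↔ x ∈ final) :
    js.foldl (pvStepA l d i) final = (js.foldl (pvStepB l d i) (final, seen)).1 ∧
    (∀ x, x ∈ (js.foldl (pvStepB l d i) (final, seen)).2
        ↔ x ∈ (js.foldl (pvStepB l d i) (final, seen)).1) := by
  induction js generalizing final seen with
  | nil => exact ⟨rfl, hinv⟩
  | cons j js ih =>
    obtain ⟨hj0, hj1⟩ := hjs j (by simp)
    obtain ⟨h1, h2⟩ := pv_step l d i j hi0 hi1 hj0 hj1 final seen hinv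
    rw [List.foldl_cons, List.foldl_cons, h1]
    have := ih (fun j hj => hjs j (by simp [hj]))
      (pvStepB l d i (final, seen) j).1 (pvStepB l d i (final, seen) j).2 h2
    simpa using this

-- the outer i-loop
lemma pv_loopI (l d : List Int)
    (is : List Int) (his : ∀ i ∈ is, 0 ≤ i ∧ i < (l.length : Int))
    (final : List (Int × Int)) (seen : PySem.Set (Int × Int))
    (hinv : ∀ x, x ∈ seen ↔ x ∈ final) :
    is.foldl (fun final i => (PySem.List.pyRange (i + 1) (PySem.List.len l)).foldl (pvStepA l d i) final) final
      = (is.foldl (fun st i => (PySem.List.pyRange (i + 1) (PySem.List.len l)).foldl (pvStepB l d i) st) (final, seen)).1 ∧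
    (∀ x, x ∈ (is.foldl (fun st i => (PySem.List.pyRange (i + 1) (PySem.List.len l)).foldl (pvStepB l d i) st) (final, seen)).2
        ↔ x ∈ (is.foldl (fun st i => (PySem.List.pyRange (i + 1) (PySem.List.len l)).foldl (pvStepB l d i) st) (final, seen)).1) := by
  induction is generalizing final seen with
  | nil => exact ⟨rfl, hinv⟩
  | cons i is ih =>
    obtain ⟨hi0, hi1⟩ := his i (by simp)
    have hjs : ∀ j ∈ PySem.List.pyRange (i + 1) (PySem.List.len l), 0 ≤ j ∧ j < (l.length : Int) := by
      intro j hj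
      rw [PySem.List.len_eq, PySem.List.mem_pyRange_one] at hj
      exact ⟨by omega, hj.2⟩
    obtain ⟨h1, h2⟩ := pv_loopJ l d i hi0 hi1 _ hjs final seen hinv
    rw [List.foldl_cons, List.foldl_cons, h1]
    have := ih (fun i hi => his i (by simp [hi]))
      ((PySem.List.pyRange (i + 1) (PySem.List.len l)).foldl (pvStepB l d i) (final, seen)).1
      ((PySem.List.pyRange (i + 1) (PySem.List.len l)).foldl (pvStepB l d i) (final, seen)).2 h2
    simpa using this

lemma pv_mekong_short (l d : List Int) (h : l.length < 2) : mekong l d = [] := by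
  unfold mekong
  match l, h with
  | [], _ => simp [PySem.List.pyRange_one_eq_nil]
  | [x], _ =>
    have h1 : PySem.List.pyRange 0 (PySem.List.len [x]) = [0] := by
      rw [PySem.List.len_eq]
      norm_num [PySem.List.pyRange_one_cons (show (0:Int) < 1 by norm_num),
        PySem.List.pyRange_one_eq_nil (show (1:Int) ≤ 0 + 1 by norm_num)]
    have h2 : PySem.List.pyRange ((0 : Int) + 1) (PySem.List.len [x]) = [] := by
      rw [PySem.List.len_eq]
      exact PySem.List.pyRange_one_eq_nil (by norm_num)
    rw [h1, List.foldl_cons, List.foldl_nil, h2, List.foldl_nil]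

-- ===== VERDICT (by name: the statement is the Claim_ definition above) =====
theorem mekong_spec : Claim_equal_mekong := by
  intro l d _ _
  unfold Spec_mekong mekong_alt
  split
  · rename_i h
    rw [PySem.List.len_eq] at h
    exact pv_mekong_short l d (by exact_mod_cast h)
  · show mekong l d =
      ((PySem.List.pyRange 0 (PySem.List.len l)).foldl
        (fun st i => (PySem.List.pyRange (i + 1) (PySem.List.len l)).foldl (pvStepB l d i) st)
        ([], PySem.Set.empty)).1
    have his : ∀ i ∈ PySem.List.pyRange 0 (PySem.List.len l), 0 ≤ i ∧ i < (l.length : Int) := by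
      intro i hi
      rw [PySem.List.len_eq, PySem.List.mem_pyRange_one] at hi
      exact hi
    have := (pv_loopI l d _ his [] PySem.Set.empty (by simp [PySem.Set.empty])).1
    calc mekong l d
        = (PySem.List.pyRange 0 (PySem.List.len l)).foldl
            (fun final i => (PySem.List.pyRange (i + 1) (PySem.List.len l)).foldl (pvStepA l d i) final) [] := rfl
      _ = _ := this
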